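-- pv_equiv track=rewrite | github.com/bucs110a0spring22/final-exam-TJ-Martineau | AnimeFact.py | fixTitle
-- ===== SOURCE A (Python) =====
-- def fixTitle(anime):
--   """
--   Takes in a title and changes it so that it can be added to a url
--
--   Arguments: anime (string) is the original title
--
--   Returns the fixed title (string)
--   """
--   anime_temp = ""
--   for letter in anime:
--     if ord(letter) == 32:
--       anime_temp = anime_temp + chr(95)
--     elif ord(letter) < 91:
--       anime_temp = anime_temp + chr(ord(letter) + 32)
--     else:
--       anime_temp = anime_temp + letter
--
--   return anime_temp
-- ===== SOURCE B (Python) =====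
-- def fixTitle(anime):
--   """
--   Staged re-implementation: spaces are handled structurally by split/join
--   (no per-character space branch), and each space-free piece is shifted by +32
--   for codepoints below 91; pieces are then joined with underscores.
--   """
--   pieces = anime.split(' ')
--   shifted = [''.join(chr(ord(c) + 32) if ord(c) < 91 else c for c in p) for p in pieces]
--   return '_'.join(shifted)
-- ===== Notes on version B (the rewrite author's own statement) =====
-- stated objective: alternative
-- what changed: Replaces A's single accumulating character loop with its per-character space branch by staged passes: split on spaces, shift each space-free piece (+32 for codepoints below 91), and join the pieces with underscores.
import Mathlib
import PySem

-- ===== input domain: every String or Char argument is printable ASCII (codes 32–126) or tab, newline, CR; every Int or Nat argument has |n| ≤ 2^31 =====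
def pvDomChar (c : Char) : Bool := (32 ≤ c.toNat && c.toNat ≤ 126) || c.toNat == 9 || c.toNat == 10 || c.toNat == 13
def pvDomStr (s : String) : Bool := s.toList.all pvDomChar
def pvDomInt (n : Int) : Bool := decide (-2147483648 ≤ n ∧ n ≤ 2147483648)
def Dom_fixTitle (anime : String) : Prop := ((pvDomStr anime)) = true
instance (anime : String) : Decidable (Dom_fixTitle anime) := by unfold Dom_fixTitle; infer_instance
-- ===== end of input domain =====

-- B restructures A's single accumulating loop (with a space branch) into staged passes:
-- split on spaces, shift each space-free piece, join with underscores; objective: alternative.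

-- ===== PORT A =====
-- A: loop over the characters, appending one character per branch to the accumulator string.
def fixTitle (anime : String) : String :=
  String.ofList <|
    anime.toList.foldl (fun acc letter =>
      acc ++ [if ((letter.toNat : Int) == 32) then Char.ofNat 95
              else if ((letter.toNat : Int) < 91) then Char.ofNat ((letter.toNat : Int) + 32).toNat
              else letter]) []

-- ===== PORT B =====
-- ''.join(chr(ord(c) + 32) if ord(c) < 91 else c for c in p)
def pvShiftPiece (p : String) : String :=
  String.ofList (p.toList.map (fun c =>
    if ((c.toNat : Int) < 91) then Char.ofNat ((c.toNat : Int) + 32).toNat else c))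

-- pieces = anime.split(' '); shifted = [… for p in pieces]; return '_'.join(shifted)
def fixTitle_alt (anime : String) : String :=
  PySem.Str.join "_" (((PySem.Str.split? anime " ").getD []).map pvShiftPiece)

-- ===== PRECONDITION & SPEC =====
def Spec_fixTitle (anime : String) (out : String) : Prop := out = fixTitle_alt anime
instance (anime : String) (out : String) : Decidable (Spec_fixTitle anime out) := by unfold Spec_fixTitle; infer_instance

-- ===== CLAIM (what is proved, stated in full; the proofs are below) =====
def Claim_equal_fixTitle : Prop := ∀ (anime : String), Dom_fixTitle anime → Spec_fixTitle anime (fixTitle anime)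

-- ===== LEMMAS AND PROOFS =====

-- A's per-character branch
def pvF (c : Char) : Char :=
  if ((c.toNat : Int) == 32) then Char.ofNat 95
  else if ((c.toNat : Int) < 91) then Char.ofNat ((c.toNat : Int) + 32).toNat
  else c

-- B's per-character shift (inside one piece)
def pvG (c : Char) : Char :=
  if ((c.toNat : Int) < 91) then Char.ofNat ((c.toNat : Int) + 32).toNat else c

-- simple structural recursion computing split-on-space with an explicit prefix accumulator
def pvSplit (pre : List Char) : List Char → List (List Char)
  | [] => [pre]
  | c :: rest => if c = ' ' then pre :: pvSplit [] rest else pvSplit (pre ++ [c]) rest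

theorem pvSplit_ne_nil (pre : List Char) (l : List Char) : pvSplit pre l ≠ [] := by
  induction l generalizing pre with
  | nil => simp [pvSplit]
  | cons c rest ih => by_cases h : c = ' ' <;> simp [pvSplit, h, ih]

theorem pv_splitOn_go_eq (l : List Char) : ∀ (fuel : Nat), l.length ≤ fuel →
    ∀ (cur : List Char) (acc : List (List Char)),
    PySem.Chars.splitOn.go [' '] fuel l cur acc = acc.reverse ++ pvSplit cur.reverse l := by
  induction l with
  | nil =>
      intro fuel _ cur acc
      cases fuel <;> simp [PySem.Chars.splitOn.go, pvSplit]
  | cons c rest ih =>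
      intro fuel hf cur acc
      cases fuel with
      | zero => simp at hf
      | succ fuel' =>
          have hf' : rest.length ≤ fuel' := by simpa using hf
          by_cases h : c = ' '
          · simp [PySem.Chars.splitOn.go, h, List.isPrefixOf, ih fuel' hf', pvSplit]
          · have hp : [' '].isPrefixOf (c :: rest) = false := by
              simp [List.isPrefixOf]; exact fun hc => h hc.symm
            simp [PySem.Chars.splitOn.go, hp, ih fuel' hf', pvSplit, h]

theorem pv_splitOn_eq (s : List Char) :
    PySem.Chars.splitOn s [' '] = pvSplit [] s := by
  unfold PySem.Chars.splitOn
  simpa using pv_splitOn_go_eq s (s.length + 1) (by omega) [] []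

theorem pv_join_pvSplit (l : List Char) : ∀ (pre : List Char),
    PySem.Chars.join ['_'] ((pvSplit pre l).map (List.map pvG))
      = pre.map pvG ++ l.map pvF := by
  induction l with
  | nil => intro pre; simp [pvSplit, PySem.Chars.join_singleton]
  | cons c rest ih =>
      intro pre
      by_cases h : c = ' '
      · obtain ⟨q, qs, hq⟩ : ∃ q qs, pvSplit [] rest = q :: qs := by
          cases hsp : pvSplit [] rest with
          | nil => exact absurd hsp (pvSplit_ne_nil [] rest)
          | cons q qs => exact ⟨q, qs, rfl⟩
        have hF : pvF c = '_' := by subst h; decide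
        subst h
        have hstep : pvSplit pre (' ' :: rest) = pre :: pvSplit [] rest := by
          simp [pvSplit]
        rw [hstep, List.map_cons, hq, List.map_cons, PySem.Chars.join_cons_cons,
            ← List.map_cons, ← hq, ih []]
        simp [hF]
      · have hfc : pvF c = pvG c := by
          have h32 : ¬ ((c.toNat : Int) = 32) := by
            intro hc
            apply h
            have hn : c.toNat = 32 := by exact_mod_cast hc
            have h2 := congrArg Char.ofNat hn
            rw [Char.ofNat_toNat] at h2
            exact h2.trans (by decide)
          simp [pvF, pvG, h32]
        simp [pvSplit, h, ih (pre ++ [c]), hfc]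

theorem pv_altToList (anime : String) :
    (fixTitle_alt anime).toList = (anime.toList.map pvF) := by
  unfold fixTitle_alt
  obtain ⟨parts, hparts, hmap⟩ : ∃ parts, PySem.Str.split? anime " " = some parts ∧
      parts.map String.toList = PySem.Chars.splitOn anime.toList [' '] := by
    have h := PySem.Str.split?_map anime " "
    cases hs : PySem.Str.split? anime " " with
    | none => rw [hs] at h; simp [PySem.Chars.split?] at h
    | some parts =>
        rw [hs] at h
        refine ⟨parts, rfl, ?_⟩
        simpa [PySem.Chars.split?] using h
  rw [hparts]
  simp only [Option.getD_some, PySem.Str.toList_join, List.map_map]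
  have hsh : (fun p => (pvShiftPiece p).toList) = fun p : String => p.toList.map pvG := by
    funext p; simp [pvShiftPiece, pvG]
  calc PySem.Chars.join "_".toList (parts.map fun p => (pvShiftPiece p).toList)
      = PySem.Chars.join ['_'] ((parts.map String.toList).map (List.map pvG)) := by
        rw [hsh]; simp [List.map_map]; rfl
    _ = anime.toList.map pvF := by
        rw [hmap, pv_splitOn_eq]
        simpa using pv_join_pvSplit anime.toList []

-- ===== VERDICT (by name: the statement is the Claim_ definition above) =====
theorem fixTitle_spec : Claim_equal_fixTitle := by
  intro anime _
  unfold Spec_fixTitle fixTitle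
  simp only [PySem.List.foldl_append_singleton_eq_map, List.nil_append]
  have h := pv_altToList anime
  have : fixTitle_alt anime = String.ofList ((fixTitle_alt anime).toList) := by
    simp
  rw [this, h]
  rfl
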